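-- pv_equiv track=rewrite | github.com/AIperture/aethergraph | src/aethergraph/services/knowledge/parsers/rst.py | _strip_simple_rst_noise
-- ===== SOURCE A (Python) =====
-- def _strip_simple_rst_noise(text: str) -> str:
--     """
--     Remove some Sphinx-ish noise that isn't helpful for search:
--
--     - Label definitions: ``.. _label-name:``
--     - Navigation-only toctrees and images (we drop the directive line,
--       but keep body text if any appears later).
--     """
--     lines = text.splitlines()
--     cleaned: list[str] = []
--     skip_indented_block = False
--
--     for line in lines:
--         stripped = line.lstrip()
--
--         if skip_indented_block:
--             # Continue skipping while the line is indented or blank.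
--             if stripped and not line.startswith(" " * 3) and not line.startswith("\t"):
--                 skip_indented_block = False
--             else:
--                 continue  # still skipping this directive's block
--
--         # Anchors: .. _some-label:
--         if stripped.startswith(".. _") and stripped.endswith(":"):
--             continue
--
--         # Navigation / non-content directives we can safely drop
--         if stripped.startswith(".. toctree::") or stripped.startswith(".. image::"):
--             skip_indented_block = True
--             continue
--
--         cleaned.append(line)
--
--     return "\n".join(cleaned)
-- ===== SOURCE B (Python) =====
-- def _strip_simple_rst_noise(text: str) -> str:
--     lines = text.splitlines()
--     cleaned = []
--     i = 0
--     n = len(lines)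
--     while i < n:
--         line = lines[i]
--         stripped = line.lstrip()
--         if stripped.startswith(".. _") and stripped.endswith(":"):
--             i += 1
--             continue
--         if stripped.startswith(".. toctree::") or stripped.startswith(".. image::"):
--             # consume the directive's indented/blank block; leave the first
--             # terminating line for the outer loop to re-test
--             i += 1
--             while i < n and (not lines[i].lstrip() or lines[i].startswith("   ") or lines[i].startswith("\t")):
--                 i += 1
--             continue
--         cleaned.append(line)
--         i += 1
--     return "\n".join(cleaned)
-- ===== Notes on version B (the rewrite author's own statement) =====
-- stated objective: alternative
-- what changed: Replaced the skip-flag state machine over a for-loop with an index-driven while loop whose inner loop consumes a directive's blank/indented block in one go, leaving the terminating line for the outer loop to re-test.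
import Mathlib
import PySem

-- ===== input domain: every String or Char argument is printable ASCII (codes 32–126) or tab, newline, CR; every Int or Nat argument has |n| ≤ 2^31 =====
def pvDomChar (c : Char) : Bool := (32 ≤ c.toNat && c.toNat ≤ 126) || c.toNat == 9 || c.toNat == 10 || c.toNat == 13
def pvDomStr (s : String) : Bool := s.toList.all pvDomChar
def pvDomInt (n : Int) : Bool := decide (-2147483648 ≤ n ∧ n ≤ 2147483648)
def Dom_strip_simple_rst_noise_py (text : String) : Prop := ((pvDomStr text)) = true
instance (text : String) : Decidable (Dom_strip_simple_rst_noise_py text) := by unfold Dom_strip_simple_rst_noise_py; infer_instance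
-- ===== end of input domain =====

-- B replaces A's skip-flag state machine with an index-style loop that consumes a
-- directive's blank/indented block in an inner loop (objective: alternative, same cost).

-- ===== PORT A =====
-- the shared fall-through code of A's loop body (anchor / directive / append)
def pvProcA (cleaned : List String) (line stripped : String) : List String × Bool :=
  if PySem.Str.startswith stripped ".. _" && PySem.Str.endswith stripped ":" then
    (cleaned, false)
  else if PySem.Str.startswith stripped ".. toctree::" || PySem.Str.startswith stripped ".. image::" then
    (cleaned, true)
  else
    (cleaned ++ [line], false)

def pvStepA (st : List String × Bool) (line : String) : List String × Bool :=
  let stripped := PySem.Str.lstrip line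
  if st.2 then
    if !(stripped == "") && !(PySem.Str.startswith line "   ") && !(PySem.Str.startswith line "\t") then
      pvProcA st.1 line stripped   -- skip_indented_block = False; fall through
    else
      st                           -- continue: still skipping this directive's block
  else
    pvProcA st.1 line stripped

def strip_simple_rst_noise_py (text : String) : String :=
  let lines := PySem.Str.splitlines text
  let r := lines.foldl pvStepA ([], false)
  PySem.Str.join "\n" r.1

-- ===== PORT B =====
-- the inner while loop of B: advance past blank or indented lines
def pvSkipBlock : List String → List String
  | [] => []
  | l :: rest =>
    if PySem.Str.lstrip l == "" || PySem.Str.startswith l "   " || PySem.Str.startswith l "\t" then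
      pvSkipBlock rest
    else
      l :: rest

-- termination fact for B's outer loop (cited by decreasing_by)
theorem pvSkipBlock_length_le : ∀ (ls : List String), (pvSkipBlock ls).length ≤ ls.length := by
  intro ls
  induction ls with
  | nil => simp [pvSkipBlock]
  | cons l rest ih =>
    simp only [pvSkipBlock]
    split
    · exact Nat.le_succ_of_le ih
    · simp

-- the outer while loop of B, recursing on the remaining suffix of lines
def pvLoopB (ls : List String) : List String :=
  match ls with
  | [] => []
  | line :: rest =>
    let stripped := PySem.Str.lstrip line
    if PySem.Str.startswith stripped ".. _" && PySem.Str.endswith stripped ":" then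
      pvLoopB rest
    else if PySem.Str.startswith stripped ".. toctree::" || PySem.Str.startswith stripped ".. image::" then
      pvLoopB (pvSkipBlock rest)
    else
      line :: pvLoopB rest
  termination_by ls.length
  decreasing_by
  · simp
  · have := pvSkipBlock_length_le rest; simp; omega
  · simp

def strip_simple_rst_noise_py_alt (text : String) : String :=
  PySem.Str.join "\n" (pvLoopB (PySem.Str.splitlines text))

-- ===== PRECONDITION & SPEC =====
def Spec_strip_simple_rst_noise_py (text : String) (out : String) : Prop := out = strip_simple_rst_noise_py_alt text
instance (text : String) (out : String) : Decidable (Spec_strip_simple_rst_noise_py text out) := by unfold Spec_strip_simple_rst_noise_py; infer_instance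

-- ===== CLAIM (what is proved, stated in full; the proofs are below) =====
def Claim_equal_strip_simple_rst_noise_py : Prop := ∀ (text : String), Dom_strip_simple_rst_noise_py text → Spec_strip_simple_rst_noise_py text (strip_simple_rst_noise_py text)

-- ===== LEMMAS AND PROOFS =====

-- loop invariant: A's fold with skip = false produces B's outer loop output;
-- with skip = true it first behaves like B's inner block-consuming loop.
theorem pvKey : ∀ (ls : List String) (c : List String),
    (ls.foldl pvStepA (c, false)).1 = c ++ pvLoopB ls ∧
    (ls.foldl pvStepA (c, true)).1 = c ++ pvLoopB (pvSkipBlock ls) := by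
  intro ls
  induction ls with
  | nil => intro c; simp [pvLoopB, pvSkipBlock]
  | cons l rest ih =>
    intro c
    have hfalse : ((l :: rest).foldl pvStepA (c, false)).1 = c ++ pvLoopB (l :: rest) := by
      simp only [List.foldl_cons, pvStepA, pvProcA, pvLoopB]
      by_cases h1 : (PySem.Str.startswith (PySem.Str.lstrip l) ".. _" &&
          PySem.Str.endswith (PySem.Str.lstrip l) ":") = true
      · simp only [h1, if_true]
        exact (ih c).1
      · simp only [Bool.not_eq_true] at h1
        simp only [h1, Bool.false_eq_true, if_false]
        by_cases h2 : (PySem.Str.startswith (PySem.Str.lstrip l) ".. toctree::" ||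
            PySem.Str.startswith (PySem.Str.lstrip l) ".. image::") = true
        · simp only [h2, if_true]
          exact (ih c).2
        · simp only [Bool.not_eq_true] at h2
          simp only [h2, Bool.false_eq_true, if_false]
          rw [(ih (c ++ [l])).1]
          simp
    constructor
    · exact hfalse
    · have hcond : (!(PySem.Str.lstrip l == "") && !(PySem.Str.startswith l "   ") &&
          !(PySem.Str.startswith l "\t")) =
          !(PySem.Str.lstrip l == "" || PySem.Str.startswith l "   " || PySem.Str.startswith l "\t") := by
        simp [Bool.not_or, Bool.and_assoc]
      by_cases hb : (PySem.Str.lstrip l == "" || PySem.Str.startswith l "   " ||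
          PySem.Str.startswith l "\t") = true
      · -- blank or indented: A keeps skipping, B's inner loop drops the line
        have hstep : pvStepA (c, true) l = (c, true) := by
          simp only [pvStepA, hcond, hb]
          rfl
        have hsb : pvSkipBlock (l :: rest) = pvSkipBlock rest := by
          simp only [pvSkipBlock, hb, if_true]
        rw [List.foldl_cons, hstep, hsb]
        exact (ih c).2
      · -- non-blank, non-indented: the flag clears and the line is re-tested,
        -- exactly as B's outer loop re-tests the block-terminating line
        have hb' := Bool.of_not_eq_true hb
        have hstep : pvStepA (c, true) l = pvStepA (c, false) l := by
          simp only [pvStepA, hcond, hb']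
          rfl
        have hsb : pvSkipBlock (l :: rest) = l :: rest := by
          simp only [pvSkipBlock, hb', Bool.false_eq_true, if_false]
        rw [List.foldl_cons, hstep, hsb, ← List.foldl_cons]
        exact hfalse

-- ===== VERDICT (by name: the statement is the Claim_ definition above) =====
theorem strip_simple_rst_noise_py_spec : Claim_equal_strip_simple_rst_noise_py := by
  intro text _
  unfold Spec_strip_simple_rst_noise_py
  simp only [strip_simple_rst_noise_py, strip_simple_rst_noise_py_alt]
  rw [(pvKey (PySem.Str.splitlines text) []).1]
  simp
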